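-- pv_equiv track=rewrite | github.com/NagAreHosi/Warming-up | crl_String.py | cat_dog
-- ===== SOURCE A (Python) =====
-- def cat_dog(str):
--   catnum = 0
--   dognum = 0
--   for i in range(len(str)-2):
--     if str[i:i+3] == 'cat':
--       catnum += 1
--       i += 3
--     elif str[i:i+3] == 'dog':
--       dognum += 1
--       i += 3
--   return catnum == dognum
-- ===== SOURCE B (Python) =====
-- def cat_dog(str):
--   # Greedy tokenizer with a single balance counter: one pass that CONSUMES a
--   # matched three-letter token whole (jumps past it) instead of testing every
--   # position with two counters; correct because neither token can start inside
--   # the other or inside itself (no shared letters, no self-overlap).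
--   balance = 0
--   i = 0
--   n = len(str)
--   while i + 3 <= n:
--     if str[i] == 'c' and str[i+1] == 'a' and str[i+2] == 't':
--       balance += 1
--       i += 3
--     elif str[i] == 'd' and str[i+1] == 'o' and str[i+2] == 'g':
--       balance -= 1
--       i += 3
--     else:
--       i += 1
--   return balance == 0
-- ===== Notes on version B (the rewrite author's own statement) =====
-- stated objective: alternative
-- what changed: Replaces A's per-position double-counter scan (which tests every index and keeps separate cat/dog counts) with a greedy tokenizer: a single pass that keeps one balance counter (+1 cat, -1 dog) and jumps past each matched token, valid because the two tokens cannot overlap themselves or each other.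
import Mathlib
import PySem

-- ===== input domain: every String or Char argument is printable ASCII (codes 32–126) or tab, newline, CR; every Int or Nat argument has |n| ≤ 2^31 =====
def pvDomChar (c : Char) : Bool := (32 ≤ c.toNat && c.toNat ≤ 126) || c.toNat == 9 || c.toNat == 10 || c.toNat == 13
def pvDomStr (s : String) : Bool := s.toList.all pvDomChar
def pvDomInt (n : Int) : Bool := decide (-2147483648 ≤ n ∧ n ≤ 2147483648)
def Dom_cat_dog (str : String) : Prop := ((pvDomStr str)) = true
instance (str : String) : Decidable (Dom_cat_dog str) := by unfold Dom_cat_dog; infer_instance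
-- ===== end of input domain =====

-- B replaces A's per-position two-counter scan with a greedy one-pass tokenizer
-- keeping a single balance counter and jumping past each matched token (objective: alternative).

-- ===== PORT A =====
def cat_dog (str : String) : Bool :=
  let st := (PySem.List.pyRange 0 (PySem.Str.len str - 2) 1).foldl
    (fun (p : Int × Int) i =>
      if PySem.Str.slice str (some i) (some (i + 3)) == "cat" then (p.1 + 1, p.2)
      else if PySem.Str.slice str (some i) (some (i + 3)) == "dog" then (p.1, p.2 + 1)
      else p) (0, 0)
  st.1 == st.2

-- ===== PORT B =====
-- the while loop over the index, as structural recursion over the remaining chars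
def catDogGo (cs : List Char) (bal : Int) : Int :=
  match cs with
  | c1 :: c2 :: c3 :: rest =>
    if c1 = 'c' ∧ c2 = 'a' ∧ c3 = 't' then catDogGo rest (bal + 1)
    else if c1 = 'd' ∧ c2 = 'o' ∧ c3 = 'g' then catDogGo rest (bal - 1)
    else catDogGo (c2 :: c3 :: rest) bal
  | _ => bal
termination_by cs.length
decreasing_by all_goals (simp only [List.length_cons]; omega)

def cat_dog_alt (str : String) : Bool :=
  catDogGo str.toList 0 == 0

-- ===== PRECONDITION & SPEC =====
def Spec_cat_dog (str : String) (out : Bool) : Prop := out = cat_dog_alt str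
instance (str : String) (out : Bool) : Decidable (Spec_cat_dog str out) := by unfold Spec_cat_dog; infer_instance

-- ===== CLAIM (what is proved, stated in full; the proofs are below) =====
def Claim_equal_cat_dog : Prop := ∀ (str : String), Dom_cat_dog str → Spec_cat_dog str (cat_dog str)

-- ===== LEMMAS AND PROOFS =====

-- number of positions i < cs.length at which p occurs (overlapping count)
def pvHits (p cs : List Char) : Nat :=
  (List.range cs.length).countP (fun i => p.isPrefixOf (cs.drop i))

lemma pvHits_nil (p : List Char) : pvHits p [] = 0 := by
  simp [pvHits]

lemma pvHits_cons (p : List Char) (c : Char) (t : List Char) :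
    pvHits p (c :: t) = (if p.isPrefixOf (c :: t) then 1 else 0) + pvHits p t := by
  unfold pvHits
  have hl : (c :: t).length = t.length + 1 := by simp
  rw [hl, List.range_succ_eq_map, List.countP_cons, List.countP_map]
  simp only [List.drop_zero]
  have hcomp : ((fun i => p.isPrefixOf (List.drop i (c :: t))) ∘ (fun x => x + 1))
      = fun i => p.isPrefixOf (List.drop i t) := by
    funext i; simp [Function.comp]
  rw [hcomp]
  by_cases h : p.isPrefixOf (c :: t) <;> simp [h] <;> omega

-- the greedy tokenizer computes bal + (#cat hits) - (#dog hits)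
lemma pvGoBalance : ∀ n (cs : List Char) (bal : Int), cs.length ≤ n →
    catDogGo cs bal = bal + (pvHits "cat".toList cs : Int) - (pvHits "dog".toList cs : Int) := by
  have hcl : "cat".toList = ['c', 'a', 't'] := rfl
  have hdl : "dog".toList = ['d', 'o', 'g'] := rfl
  intro n
  induction n with
  | zero =>
      intro cs bal h
      have : cs = [] := by cases cs <;> simp_all
      subst this
      simp [catDogGo, pvHits_nil]
  | succ n ih =>
      intro cs bal h
      match cs with
      | [] => simp [catDogGo, pvHits_nil]
      | [a] =>
          rw [catDogGo.eq_def]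
          simp [hcl, hdl, pvHits_cons, pvHits_nil, List.isPrefixOf]
      | [a, b] =>
          rw [catDogGo.eq_def]
          simp [hcl, hdl, pvHits_cons, pvHits_nil, List.isPrefixOf]
      | c1 :: c2 :: c3 :: rest =>
        rw [catDogGo]
        by_cases hcat : c1 = 'c' ∧ c2 = 'a' ∧ c3 = 't'
        · obtain ⟨rfl, rfl, rfl⟩ := hcat
          rw [if_pos ⟨rfl, rfl, rfl⟩]
          rw [ih rest (bal + 1) (by simp at h ⊢; omega)]
          rw [pvHits_cons "cat".toList 'c', pvHits_cons "cat".toList 'a',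
            pvHits_cons "cat".toList 't', pvHits_cons "dog".toList 'c',
            pvHits_cons "dog".toList 'a', pvHits_cons "dog".toList 't']
          simp only [hcl, hdl, List.isPrefixOf]
          simp
          ring
        · rw [if_neg hcat]
          by_cases hdog : c1 = 'd' ∧ c2 = 'o' ∧ c3 = 'g'
          · obtain ⟨rfl, rfl, rfl⟩ := hdog
            rw [if_pos ⟨rfl, rfl, rfl⟩]
            rw [ih rest (bal - 1) (by simp at h ⊢; omega)]
            rw [pvHits_cons "cat".toList 'd', pvHits_cons "cat".toList 'o',
              pvHits_cons "cat".toList 'g', pvHits_cons "dog".toList 'd',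
              pvHits_cons "dog".toList 'o', pvHits_cons "dog".toList 'g']
            simp only [hcl, hdl, List.isPrefixOf]
            simp
            ring
          · rw [if_neg hdog]
            rw [ih (c2 :: c3 :: rest) bal (by simp at h ⊢; omega)]
            have hc : "cat".toList.isPrefixOf (c1 :: c2 :: c3 :: rest) = false := by
              by_contra hcon
              rw [Bool.not_eq_false, hcl, List.isPrefixOf_iff_prefix] at hcon
              simp only [List.cons_prefix_cons, List.nil_prefix, and_true] at hcon
              exact hcat ⟨hcon.1.symm, hcon.2.1.symm, hcon.2.2.symm⟩
            have hd : "dog".toList.isPrefixOf (c1 :: c2 :: c3 :: rest) = false := by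
              by_contra hcon
              rw [Bool.not_eq_false, hdl, List.isPrefixOf_iff_prefix] at hcon
              simp only [List.cons_prefix_cons, List.nil_prefix, and_true] at hcon
              exact hdog ⟨hcon.1.symm, hcon.2.1.symm, hcon.2.2.symm⟩
            rw [pvHits_cons "cat".toList c1 (c2 :: c3 :: rest),
              pvHits_cons "dog".toList c1 (c2 :: c3 :: rest), hc, hd]
            simp

-- the generic pair-counter fold (A's loop shape)
lemma pvFoldPair {α : Type} (P Q : α → Bool) (l : List α) (a b : Int) :
    l.foldl (fun (p : Int × Int) i =>
      if P i then (p.1 + 1, p.2) else if Q i then (p.1, p.2 + 1) else p) (a, b)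
    = (a + (l.countP P : Int), b + (l.countP (fun i => !P i && Q i) : Int)) := by
  induction l generalizing a b with
  | nil => simp
  | cons x xs ih =>
      simp only [List.foldl_cons, List.countP_cons]
      by_cases hP : P x
      · simp only [hP, if_true, Bool.not_true, Bool.false_and, ih, Prod.mk.injEq]
        constructor <;> push_cast <;> ring
      · by_cases hQ : Q x
        · simp only [hP, hQ, if_true, Bool.not_false, Bool.true_and,
            ih, Prod.mk.injEq]
          constructor <;> push_cast <;> ring
        · simp [hP, hQ, ih]

lemma pvSliceEq (cs : List Char) (k : Nat) (p : List Char) (hp : p.length = 3) :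
    (PySem.List.slice cs (some (k : Int)) (some ((k : Int) + 3)) = p)
    ↔ p.isPrefixOf (cs.drop k) := by
  have h3 : ((k : Int) + 3) = ((k + 3 : Nat) : Int) := by push_cast; ring
  rw [h3, PySem.List.slice_natCast]
  have h4 : k + 3 - k = 3 := by omega
  rw [h4, List.isPrefixOf_iff_prefix, List.prefix_iff_eq_take, hp]
  constructor <;> intro h <;> exact h.symm

-- matches at positions ≥ len-2 are impossible (the remainder is shorter than p)
lemma pvHitsTrunc (p cs : List Char) (hp : p.length = 3) :
    (List.range (cs.length - 2)).countP (fun i => p.isPrefixOf (cs.drop i))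
    = pvHits p cs := by
  unfold pvHits
  by_cases h2 : 2 ≤ cs.length
  · have hsplit : cs.length = (cs.length - 2) + 2 := by omega
    conv_rhs => rw [hsplit]
    rw [List.range_add, List.countP_append]
    have hz : ((List.range 2).map (fun x => cs.length - 2 + x)).countP
        (fun i => p.isPrefixOf (cs.drop i)) = 0 := by
      rw [List.countP_map, List.countP_eq_zero]
      intro k hk
      rw [List.mem_range] at hk
      simp only [Function.comp_apply]
      rw [List.isPrefixOf_iff_prefix]
      intro hpre
      have := hpre.length_le
      simp [hp] at this
      omega
    omega
  · have h0 : cs.length - 2 = 0 := by omega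
    rw [h0]
    have hz : (List.range cs.length).countP
        (fun i => p.isPrefixOf (cs.drop i)) = 0 := by
      rw [List.countP_eq_zero]
      intro k hk
      rw [List.mem_range] at hk
      rw [List.isPrefixOf_iff_prefix]
      intro hpre
      have := hpre.length_le
      simp [hp] at this
      omega
    simp [hz]

-- ===== VERDICT (by name: the statement is the Claim_ definition above) =====
theorem cat_dog_spec : Claim_equal_cat_dog := by
  intro str _
  unfold Spec_cat_dog cat_dog cat_dog_alt
  set cs := str.toList with hcs
  have hslice : ∀ (p : List Char), p.length = 3 → ∀ (k : Nat),
      (PySem.Str.slice str (some (k : Int)) (some ((k : Int) + 3)) == String.ofList p)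
      = p.isPrefixOf (cs.drop k) := by
    intro p hp k
    rw [Bool.eq_iff_iff, beq_iff_eq, ← String.toList_inj, PySem.Str.toList_slice]
    simpa [PySem.Chars.slice_eq_listSlice, ← hcs] using pvSliceEq cs k p hp
  rw [PySem.List.pyRange_one, List.foldl_map]
  have hlen : (PySem.Str.len str - 2 - 0).toNat = cs.length - 2 := by
    simp only [PySem.Str.len, ← hcs, Int.sub_zero]
    omega
  simp only [zero_add]
  rw [hlen]
  rw [pvFoldPair
        (fun y : Nat => PySem.Str.slice str (some (y : Int)) (some ((y : Int) + 3)) == "cat")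
        (fun y : Nat => PySem.Str.slice str (some (y : Int)) (some ((y : Int) + 3)) == "dog")
        (List.range (cs.length - 2)) 0 0]
  have hc : ∀ k : Nat,
      (PySem.Str.slice str (some (k : Int)) (some ((k : Int) + 3)) == "cat")
      = ("cat".toList.isPrefixOf (cs.drop k)) := by
    intro k; simpa using hslice "cat".toList rfl k
  have hd : ∀ k : Nat,
      (PySem.Str.slice str (some (k : Int)) (some ((k : Int) + 3)) == "dog")
      = ("dog".toList.isPrefixOf (cs.drop k)) := by
    intro k; simpa using hslice "dog".toList rfl k
  have hdisj : ∀ k : Nat,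
      (!("cat".toList.isPrefixOf (cs.drop k)) && ("dog".toList.isPrefixOf (cs.drop k)))
      = ("dog".toList.isPrefixOf (cs.drop k)) := by
    intro k
    cases hcat : "cat".toList.isPrefixOf (cs.drop k) with
    | false => rw [Bool.not_false, Bool.true_and]
    | true =>
        have hd' : "dog".toList.isPrefixOf (cs.drop k) = false := by
          by_contra hcon
          rw [Bool.not_eq_false, List.isPrefixOf_iff_prefix] at hcon
          rw [List.isPrefixOf_iff_prefix] at hcat
          have heq := (List.prefix_of_prefix_length_le hcat hcon (by simp)).eq_of_length
            (by simp)
          simp at heq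
        rw [hd', Bool.and_false]
  simp only [hc, hd, hdisj]
  rw [pvHitsTrunc "cat".toList cs rfl, pvHitsTrunc "dog".toList cs rfl]
  rw [pvGoBalance cs.length cs 0 le_rfl]
  rw [Bool.eq_iff_iff, beq_iff_eq, beq_iff_eq]
  omega
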